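-- pv_equiv track=rewrite | github.com/zxhxg/llmffn | scripts/example/run_cutracer_matmul_128.py | classify_addrs
-- ===== SOURCE A (Python) =====
-- def classify_addrs(addrs: list[int]) -> str:
--     if len(addrs) <= 1:
--         return "short"
--     unique_count = len(set(addrs))
--     diffs = [addrs[index + 1] - addrs[index] for index in range(len(addrs) - 1)]
--     if unique_count == 1:
--         return "all_same"
--     if all(diff == 2 for diff in diffs):
--         return "stride_2"
--     if all(diff == 4 for diff in diffs):
--         return "stride_4"
--     if any(addr == 0 for addr in addrs):
--         return "contains_zero"
--     return "other"
-- ===== SOURCE B (Python) =====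
-- def classify_addrs(addrs: list[int]) -> str:
--     n = len(addrs)
--     if n <= 1:
--         return "short"
--     a0 = addrs[0]
--     if addrs == [a0] * n:
--         return "all_same"
--     if addrs == list(range(a0, a0 + 2 * n, 2)):
--         return "stride_2"
--     if addrs == list(range(a0, a0 + 4 * n, 4)):
--         return "stride_4"
--     if 0 in addrs:
--         return "contains_zero"
--     return "other"
-- ===== Notes on version B (the rewrite author's own statement) =====
-- stated objective: alternative
-- what changed: Instead of computing a set of distinct values and a list of consecutive differences and scanning them, B generates the three closed-form candidate pattern lists ([a0]*n and the arithmetic progressions range(a0, a0+2n, 2), range(a0, a0+4n, 4)) and compares the input against them wholesale, using that a length>=2 list has one distinct value iff it equals [a0]*n.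
import Mathlib
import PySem

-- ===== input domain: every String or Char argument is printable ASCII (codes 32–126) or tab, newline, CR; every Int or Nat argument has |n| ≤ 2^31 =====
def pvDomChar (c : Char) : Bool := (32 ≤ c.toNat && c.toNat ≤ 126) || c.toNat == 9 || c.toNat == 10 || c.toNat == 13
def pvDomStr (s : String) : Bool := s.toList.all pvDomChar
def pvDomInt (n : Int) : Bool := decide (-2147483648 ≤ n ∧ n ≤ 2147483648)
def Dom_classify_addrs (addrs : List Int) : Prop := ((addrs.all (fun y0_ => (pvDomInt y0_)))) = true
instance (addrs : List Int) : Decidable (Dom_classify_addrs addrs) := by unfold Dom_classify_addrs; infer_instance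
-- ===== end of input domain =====

-- B replaces A's set/diffs-list scans by generating the closed-form candidate pattern lists ([a0]*n, range(a0,a0+2n,2), range(a0,a0+4n,4)) and comparing the input against them wholesale (alternative decomposition, same O(n) cost).


-- ===== PORT A =====
def classify_addrs (addrs : List Int) : String :=
  if addrs.length ≤ 1 then "short"
  else
    let unique_count : Int := PySem.Set.len (PySem.Set.ofList addrs)
    let diffs : List Int := (PySem.List.pyRange 0 ((addrs.length : Int) - 1) 1).map
      (fun index => PySem.List.pyGetD addrs (index + 1) 0 - PySem.List.pyGetD addrs index 0)
    -- indices index and index+1 are always in range, so pyGetD's default is never used (exact)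
    if unique_count == 1 then "all_same"
    else if diffs.all (fun diff => diff == 2) then "stride_2"
    else if diffs.all (fun diff => diff == 4) then "stride_4"
    else if addrs.any (fun addr => addr == 0) then "contains_zero"
    else "other"

-- ===== PORT B =====
def classify_addrs_alt (addrs : List Int) : String :=
  let n := addrs.length
  if n ≤ 1 then "short"
  else
    let a0 := PySem.List.pyGetD addrs 0 0   -- addrs[0], in range since n ≥ 2 (exact)
    if addrs == List.replicate n a0 then "all_same"
    else if addrs == PySem.List.pyRange a0 (a0 + 2 * (n : Int)) 2 then "stride_2"
    else if addrs == PySem.List.pyRange a0 (a0 + 4 * (n : Int)) 4 then "stride_4"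
    else if addrs.contains 0 then "contains_zero"
    else "other"

-- ===== PRECONDITION & SPEC =====
def Spec_classify_addrs (addrs : List Int) (out : String) : Prop := out = classify_addrs_alt addrs
instance (addrs : List Int) (out : String) : Decidable (Spec_classify_addrs addrs out) := by unfold Spec_classify_addrs; infer_instance

-- ===== CLAIM =====
def Claim_equal_classify_addrs : Prop := ∀ (addrs : List Int), Dom_classify_addrs addrs → Spec_classify_addrs addrs (classify_addrs addrs)

-- ===== LEMMAS AND PROOFS =====

-- the consecutive-differences list of a :: l, as a zipWith
def pairDiffs (a : Int) (l : List Int) : List Int := List.zipWith (fun x y => y - x) (a :: l) l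

-- A's index-based diffs comprehension equals the zipWith form
theorem diffs_eq_pairDiffs (a : Int) (l : List Int) :
    (PySem.List.pyRange 0 (((a :: l).length : Int) - 1) 1).map
      (fun index => PySem.List.pyGetD (a :: l) (index + 1) 0 - PySem.List.pyGetD (a :: l) index 0)
    = pairDiffs a l := by
  apply List.ext_getElem
  · simp only [List.length_map, PySem.List.length_pyRange_one, pairDiffs, List.length_zipWith,
      List.length_cons]
    omega
  · intro k h1 h2
    have hk : k < l.length := by
      simpa [PySem.List.length_pyRange_one] using h1
    have hr : k < (PySem.List.pyRange 0 (((a :: l).length : Int) - 1) 1).length := by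
      simpa [PySem.List.length_pyRange_one] using h1
    rw [List.getElem_map, PySem.List.getElem_pyRange_one 0 _ k]
    rw [PySem.List.pyGetD_eq_getElem _ _ (by omega) (by simp; omega),
        PySem.List.pyGetD_eq_getElem _ _ (by omega) (by simp; omega)]
    have e1 : ((0 + (k : Int)) + 1).toNat = k + 1 := by omega
    have e2 : (0 + (k : Int)).toNat = k := by omega
    simp only [e1, e2]
    simp [pairDiffs, List.getElem_zipWith]

-- the arithmetic progression of length n starting at a with step s
def progList (a s : Int) : Nat → List Int
  | 0 => []
  | n + 1 => a :: progList (a + s) s n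

theorem progList_eq_map (s : Int) : ∀ (n : Nat) (a : Int),
    progList a s n = (List.range n).map (fun k : Nat => a + s * (k : Int)) := by
  intro n
  induction n with
  | zero => intro a; simp [progList]
  | succ m ih =>
    intro a
    rw [List.range_succ_eq_map]
    simp only [progList, List.map_cons, List.map_map, List.cons.injEq]
    refine ⟨by simp, ?_⟩
    rw [ih (a + s)]
    apply List.map_congr_left
    intro k _
    simp only [Function.comp]
    push_cast
    ring

-- a cons list is the arithmetic progression with head a and step s iff all consecutive differences equal s
theorem prog_iff (s : Int) : ∀ (l : List Int) (a : Int),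
    (a :: l = progList a s (l.length + 1)) ↔
      (pairDiffs a l).all (fun d => d == s) = true := by
  intro l
  induction l with
  | nil => intro a; simp [progList, pairDiffs]
  | cons b r ih =>
    intro a
    simp only [progList, List.length_cons, List.cons.injEq, true_and]
    have hiff := ih (a + s)
    simp only [progList, List.cons.injEq, true_and] at hiff
    constructor
    · rintro ⟨hb, hr⟩
      subst hb
      simp only [pairDiffs, List.zipWith, List.all_cons, Bool.and_eq_true, beq_iff_eq]
      refine ⟨by ring, ?_⟩
      simpa [pairDiffs] using hiff.mp hr
    · intro h
      simp only [pairDiffs, List.zipWith, List.all_cons, Bool.and_eq_true, beq_iff_eq] at h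
      obtain ⟨hd, ht⟩ := h
      have hb : b = a + s := by omega
      subst hb
      exact ⟨rfl, hiff.mpr (by simpa [pairDiffs] using ht)⟩

-- set(addrs) has exactly one element iff every element equals the head (len >= 1)
theorem set_len_one_iff (a : Int) (l : List Int) :
    (PySem.Set.len (PySem.Set.ofList (a :: l)) == (1 : Int)) = l.all (fun x => x == a) := by
  by_cases hall : ∀ x ∈ l, x = a
  · have key : ∀ (m : List Int), (∀ x ∈ m, x = a) → m.foldl PySem.Set.add [a] = [a] := by
      intro m
      induction m with
      | nil => intro _; rfl
      | cons y ys ihm =>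
        intro hm
        have hy : y = a := hm y (by simp)
        subst hy
        have hadd : PySem.Set.add [y] y = [y] := by
          simp [PySem.Set.add, PySem.Set.contains]
        simp only [List.foldl_cons, hadd]
        exact ihm (fun x hx => hm x (by simp [hx]))
    have hset : PySem.Set.ofList (a :: l) = [a] := by
      calc PySem.Set.ofList (a :: l) = (a :: l).foldl PySem.Set.add [] := PySem.Set.ofList_eq_foldl _
        _ = l.foldl PySem.Set.add (PySem.Set.add [] a) := by simp
        _ = l.foldl PySem.Set.add [a] := rfl
        _ = [a] := key l hall
    rw [hset]
    have : ((PySem.Set.len [a] : Int) == 1) = true := by rfl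
    rw [this]
    symm
    simp only [List.all_eq_true, beq_iff_eq]
    exact hall
  · push Not at hall
    obtain ⟨x, hxl, hxa⟩ := hall
    have hmem_a : a ∈ PySem.Set.ofList (a :: l) := (PySem.Set.mem_ofList _ _).mpr (by simp)
    have hmem_x : x ∈ PySem.Set.ofList (a :: l) := (PySem.Set.mem_ofList _ _).mpr (by simp [hxl])
    have hlen : (PySem.Set.ofList (a :: l)).length ≠ 1 := by
      intro h1
      obtain ⟨y, hy⟩ := List.length_eq_one_iff.mp h1
      rw [hy] at hmem_a hmem_x
      simp at hmem_a hmem_x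
      exact hxa (hmem_x.trans hmem_a.symm)
    have hr : (PySem.Set.len (PySem.Set.ofList (a :: l)) == (1 : Int)) = false := by
      simp only [PySem.Set.len, beq_eq_false_iff_ne, ne_eq]
      intro hc
      exact hlen (by exact_mod_cast hc)
    rw [hr]
    symm
    simp only [List.all_eq_false]
    exact ⟨x, hxl, by simpa using hxa⟩

-- B's whole-list comparison with [a0]*n is A's unique_count == 1 test
theorem replicate_cond (a : Int) (l : List Int) :
    ((a :: l : List Int) == List.replicate (a :: l).length a) =
      (PySem.Set.len (PySem.Set.ofList (a :: l)) == (1 : Int)) := by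
  rw [set_len_one_iff]
  rw [Bool.eq_iff_iff]
  simp only [beq_iff_eq, List.eq_replicate_iff, List.all_eq_true, beq_iff_eq, List.length_cons]
  constructor
  · rintro ⟨-, h⟩ x hx
    exact h x (by simp [hx])
  · intro h
    refine ⟨by trivial, ?_⟩
    rintro x hx
    rcases List.mem_cons.mp hx with h' | h'
    · exact h'
    · exact h x h'

-- B's whole-list comparison with range(a0, a0+s*n, s) is A's all-diffs-equal-s test (s = 2 or 4)
theorem stride_cond (s : Int) (hs : 0 < s) (a : Int) (l : List Int) :
    ((a :: l : List Int) == PySem.List.pyRange a (a + s * (((a :: l).length : Nat) : Int)) s) =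
      (pairDiffs a l).all (fun d => d == s) := by
  rw [PySem.List.pyRange_of_pos _ _ hs]
  have hN : ((a :: l).length : Int) = (l.length : Int) + 1 := by simp
  have hlt : a < a + s * (((a :: l).length : Nat) : Int) := by
    have : (0 : Int) < s * (((a :: l).length : Nat) : Int) := by
      apply mul_pos hs; rw [hN]; positivity
    omega
  rw [if_pos hlt]
  have hcnt : ((a + s * (((a :: l).length : Nat) : Int) - a + s - 1) / s).toNat = l.length + 1 := by
    have h1 : a + s * (((a :: l).length : Nat) : Int) - a + s - 1
        = s * ((l.length : Int) + 2) - 1 := by rw [hN]; ring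
    rw [h1]
    have h2 : s * ((l.length : Int) + 2) - 1 = (s - 1) + ((l.length : Int) + 1) * s := by ring
    rw [h2, Int.add_mul_ediv_right _ _ (by omega : s ≠ 0), Int.ediv_eq_zero_of_lt (by omega) (by omega)]
    omega
  rw [hcnt, ← progList_eq_map s (l.length + 1) a, Bool.eq_iff_iff, beq_iff_eq]
  exact prog_iff s l a

-- ===== VERDICT (by name: the statement is the Claim_ definition above) =====
theorem classify_addrs_spec : Claim_equal_classify_addrs := by
  intro addrs _
  unfold Spec_classify_addrs
  match addrs with
  | [] => rfl
  | [a] => rfl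
  | a :: b :: r =>
    unfold classify_addrs classify_addrs_alt
    have hlen : ¬ ((a :: b :: r).length ≤ 1) := by simp
    rw [if_neg hlen, if_neg hlen]
    have ha0 : PySem.List.pyGetD (a :: b :: r) 0 0 = a := by simp [pysem]
    have hz : ((a :: b :: r : List Int).contains 0) = ((a :: b :: r).any (fun x => x == 0)) := by
      rw [Bool.eq_iff_iff]
      simp only [List.contains_iff_mem, List.any_eq_true, beq_iff_eq]
      constructor
      · intro h; exact ⟨0, h, rfl⟩
      · rintro ⟨x, hx, rfl⟩; exact hx
    show (if (PySem.Set.len (PySem.Set.ofList (a :: b :: r)) == (1 : Int)) = true then "all_same"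
      else if (((PySem.List.pyRange 0 (((a :: b :: r).length : Int) - 1) 1).map
          (fun index => PySem.List.pyGetD (a :: b :: r) (index + 1) 0
            - PySem.List.pyGetD (a :: b :: r) index 0)).all (fun diff => diff == 2)) = true
        then "stride_2"
      else if (((PySem.List.pyRange 0 (((a :: b :: r).length : Int) - 1) 1).map
          (fun index => PySem.List.pyGetD (a :: b :: r) (index + 1) 0
            - PySem.List.pyGetD (a :: b :: r) index 0)).all (fun diff => diff == 4)) = true
        then "stride_4"
      else if ((a :: b :: r).any (fun addr => addr == 0)) = true then "contains_zero"
      else "other")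
      =
      (if ((a :: b :: r : List Int)
            == List.replicate (a :: b :: r).length (PySem.List.pyGetD (a :: b :: r) 0 0)) = true
        then "all_same"
      else if ((a :: b :: r : List Int) == PySem.List.pyRange (PySem.List.pyGetD (a :: b :: r) 0 0)
          (PySem.List.pyGetD (a :: b :: r) 0 0 + 2 * ((a :: b :: r).length : Int)) 2) = true
        then "stride_2"
      else if ((a :: b :: r : List Int) == PySem.List.pyRange (PySem.List.pyGetD (a :: b :: r) 0 0)
          (PySem.List.pyGetD (a :: b :: r) 0 0 + 4 * ((a :: b :: r).length : Int)) 4) = true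
        then "stride_4"
      else if ((a :: b :: r : List Int).contains 0) = true then "contains_zero"
      else "other")
    rw [ha0, hz, diffs_eq_pairDiffs a (b :: r), replicate_cond a (b :: r),
      stride_cond 2 (by norm_num) a (b :: r), stride_cond 4 (by norm_num) a (b :: r)]
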